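-- pv_equiv track=rewrite | github.com/VIBogdanov/demo-python | src/demo/puzzles.py | get_incremental_list
-- ===== SOURCE A (Python) =====
-- from collections.abc import Generator, Iterable, Iterator
--
-- def get_incremental_list(digits: Iterable[int]) -> tuple[int, list[int], list]:
--     """Из заданного набора целых чисел получить список возрастающих чисел
--     за минимальное количество изменений исходного списка. Возможны как
--     положительные, так и отрицательные значения, включая ноль. Сортировка не требуется.
--
--     Example:
--     get_incremental_list([1, 7, 3, 3]) -> (2, [1, 3], [1, 2, 3, 4])
--     get_incremental_list([3, 2, 1]) -> (0, [], [3, 2, 1])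
--     get_incremental_list([-2, 0, 4]) -> (1, [2], [-2, 0, -1])
--
--     Args:
--         digits (Iterable): Заданный список целых чисел.
--
--     Returns:
--         (tuple[int,list,list]): Количество изменений, измененные позиции и список возрастающих чисел.
--     """
--     # Итератор позволит работать даже с генераторами.
--     it_digits: Iterator[int] = iter(digits)
--     try:
--         # Начальное значение результирующего списка инициализируем
--         # первым элементом входных данных
--         begin: int = next(it_digits)
--     except StopIteration:
--         return (0, [], [])  # Если список исходных данных пуст
--
--     result: list[int | None] = [begin]
--     # Используем set, чтобы ускорить поиск по списку уже обработанных элементов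
--     # Дополнительные затраты памяти на set - это плата за скорость поиска
--     # Если память важнее, вместо elements_used нужно использовать список result
--     elements_used: set[int] = {begin}
--     # Индексы позиций в списке, в которых произошла замена
--     positions: list[int] = list()
--
--     # Стартуем со второго элемента входных данных
--     for dig in it_digits:
--         # Дубликаты заменяем на None
--         if dig in elements_used:
--             result.append(None)
--         else:
--             result.append(dig)
--             elements_used.add(dig)
--             # Обновляем значение, с которого начинается результирующий список
--             begin = min(dig, begin)
--
--     # Значение, которым должен заканчиваться результирующий список
--     end: int = (len(result) + begin) - 1
--     # Генератор чисел, которые нужно подставить,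
--     # чтобы получить возрастающий список.
--     missing_digits: Generator[int, None, None] = (
--         n for n in range(begin, end + 1) if n not in elements_used
--     )
--     # Проверяем каждое значение списка: если значение не входит
--     # в результирующий диапазон или продублировано, заменяем его
--     # на число из генератора для подстановки
--     for i, val in enumerate(result):
--         if val is None or val > end:
--             result[i] = next(missing_digits)
--             positions.append(i)
--
--     return (len(positions), positions, result)
-- ===== SOURCE B (Python) =====
-- def get_incremental_list(digits):
--     """Counting-style re-implementation: a value-indexed first-occurrence array
--     (no hash set/dict), an explicit ascending gap list, and a backward fill that
--     consumes the gaps as a stack from the largest down, reversing at the end."""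
--     vals = list(digits)
--     n = len(vals)
--     if n == 0:
--         return (0, [], [])
--     begin = min(vals)
--     # first[j] = index of the first occurrence of value begin + j, or -1
--     first = [-1] * n
--     for i in range(n):
--         j = vals[i] - begin
--         if 0 <= j < n and first[j] == -1:
--             first[j] = i
--     # ascending list of the range values that never occur
--     gaps = [begin + j for j in range(n) if first[j] == -1]
--     result = []
--     positions = []
--     for i in range(n - 1, -1, -1):
--         j = vals[i] - begin
--         if 0 <= j < n and first[j] == i:
--             result.append(vals[i])
--         else:
--             result.append(gaps.pop())
--             positions.append(i)
--     result.reverse()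
--     positions.reverse()
--     return (len(positions), positions, result)
-- ===== Notes on version B (the rewrite author's own statement) =====
-- stated objective: alternative
-- what changed: B drops A's hash-set/None-sentinel forward machinery entirely: it indexes values into a counting-style array first[] of first-occurrence positions (first[v-min] = index, array position = value offset), materialises the ascending gap list from that array, and then fills the list BACKWARD, popping the gaps as a stack so the largest missing value lands at the rightmost replaced position, reversing result and positions at the end.
import Mathlib
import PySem

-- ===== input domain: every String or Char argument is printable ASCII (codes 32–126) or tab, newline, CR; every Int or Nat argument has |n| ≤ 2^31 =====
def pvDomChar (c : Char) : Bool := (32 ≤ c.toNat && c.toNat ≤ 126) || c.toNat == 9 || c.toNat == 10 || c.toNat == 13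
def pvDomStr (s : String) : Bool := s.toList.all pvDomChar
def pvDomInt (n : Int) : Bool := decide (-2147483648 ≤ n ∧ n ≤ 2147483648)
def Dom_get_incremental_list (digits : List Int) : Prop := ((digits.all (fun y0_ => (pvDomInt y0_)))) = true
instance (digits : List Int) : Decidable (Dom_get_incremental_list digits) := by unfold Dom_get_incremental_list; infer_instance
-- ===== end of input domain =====

-- B replaces A's hash-set/None-sentinel forward fill by a value-indexed first-occurrence
-- array, an explicit ascending gap list, and a backward fill consuming the gaps as a
-- stack from the largest down (objective: alternative).

-- ===== PORT A =====
-- first loop of A: build (result-with-None-markers, set of seen elements, running min)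
def pvA_step (st : List (Option Int) × PySem.Set Int × Int) (dig : Int) :
    List (Option Int) × PySem.Set Int × Int :=
  if PySem.Set.contains st.2.1 dig then (st.1 ++ [none], st.2.1, st.2.2)
  else (st.1 ++ [some dig], PySem.Set.add st.2.1 dig, min dig st.2.2)

-- second loop of A: replace None / too-large entries by the next missing value.
-- 'next(missing_digits)' is ported as taking the head of the remaining missing list;
-- the generator is never exhausted (replacements = missing values), so the headD
-- default is never read.
def pvA_fill (e : Int) (acc : List Int × List Int × List Int) (p : Int × Option Int) :
    List Int × List Int × List Int :=
  match p.2 with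
  | none => (acc.1 ++ [acc.2.2.headD 0], acc.2.1 ++ [p.1], acc.2.2.tail)
  | some v =>
    if v > e then (acc.1 ++ [acc.2.2.headD 0], acc.2.1 ++ [p.1], acc.2.2.tail)
    else (acc.1 ++ [v], acc.2.1, acc.2.2)

def get_incremental_list (digits : List Int) : Int × List Int × List Int :=
  match digits with
  | [] => (0, [], [])
  | b0 :: rest =>
    let st := rest.foldl pvA_step ([some b0], PySem.Set.ofList [b0], b0)
    let e : Int := (st.1.length : Int) + st.2.2 - 1
    let missing := (PySem.List.pyRange st.2.2 (e + 1) 1).filter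
      (fun n => !(PySem.Set.contains st.2.1 n))
    let fin := (PySem.List.enumerate st.1 0).foldl (pvA_fill e) ([], [], missing)
    ((fin.2.1.length : Int), fin.2.1, fin.1)

-- ===== PORT B =====
-- first loop of B: value-indexed array of first-occurrence positions.
-- 'vals[i]' / 'first[j]' are read with getD after the same bounds guard Python has,
-- so the defaults are never read.
def pvB_mark (vals : List Int) (n : Nat) (bg : Int) (f : List Int) (i : Int) : List Int :=
  let j := vals.getD i.toNat 0 - bg
  if 0 ≤ j ∧ j < (n : Int) ∧ f.getD j.toNat 0 = -1 then f.set j.toNat i else f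

-- backward fill loop of B: 'gaps.pop()' is ported as getLastD/dropLast; the gap stack
-- is never empty when popped (gaps = number of replacements), so the default is never read.
def pvB_fill (vals : List Int) (n : Nat) (bg : Int) (first : List Int)
    (acc : List Int × List Int × List Int) (i : Int) : List Int × List Int × List Int :=
  let j := vals.getD i.toNat 0 - bg
  if 0 ≤ j ∧ j < (n : Int) ∧ first.getD j.toNat 0 = i then
    (acc.1 ++ [vals.getD i.toNat 0], acc.2)
  else
    (acc.1 ++ [acc.2.2.getLastD 0], acc.2.1 ++ [i], acc.2.2.dropLast)

def get_incremental_list_alt (digits : List Int) : Int × List Int × List Int :=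
  let n := digits.length
  if n = 0 then (0, [], [])
  else
    let bg := (PySem.List.min? digits (fun x => x)).getD 0
    let first := (PySem.List.pyRange 0 (n : Int) 1).foldl (pvB_mark digits n bg)
      (List.replicate n (-1 : Int))
    let gaps := (PySem.List.pyRange 0 (n : Int) 1).filterMap
      (fun j => if first.getD j.toNat 0 = -1 then some (bg + j) else none)
    let fin := (PySem.List.pyRange ((n : Int) - 1) (-1) (-1)).foldl
      (pvB_fill digits n bg first) ([], [], gaps)
    ((fin.2.1.length : Int), fin.2.1.reverse, fin.1.reverse)

-- ===== PRECONDITION & SPEC =====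
def Spec_get_incremental_list (digits : List Int) (out : Int × List Int × List Int) : Prop := out = get_incremental_list_alt digits
instance (digits : List Int) (out : Int × List Int × List Int) : Decidable (Spec_get_incremental_list digits out) := by unfold Spec_get_incremental_list; infer_instance

-- ===== CLAIM (what is proved, stated in full; the proofs are below) =====
def Claim_equal_get_incremental_list : Prop := ∀ (digits : List Int), Dom_get_incremental_list digits → Spec_get_incremental_list digits (get_incremental_list digits)

-- ===== LEMMAS AND PROOFS =====

-- ---------- A-side loop characterisations ----------
def pvMk (s : PySem.Set Int) : List Int → List (Option Int)
  | [] => []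
  | x :: xs =>
    if PySem.Set.contains s x then none :: pvMk s xs
    else some x :: pvMk (PySem.Set.add s x) xs

def pvSM (s : PySem.Set Int) (m : Int) : List Int → PySem.Set Int × Int
  | [] => (s, m)
  | x :: xs =>
    if PySem.Set.contains s x then pvSM s m xs
    else pvSM (PySem.Set.add s x) (min x m) xs

theorem pvA_loop (l : List Int) : ∀ (r : List (Option Int)) (s : PySem.Set Int) (m : Int),
    l.foldl pvA_step (r, s, m) = (r ++ pvMk s l, pvSM s m l) := by
  induction l with
  | nil => intro r s m; simp [pvMk, pvSM]
  | cons x xs ih =>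
    intro r s m
    simp only [List.foldl_cons, pvA_step, pvMk, pvSM]
    by_cases h : x ∈ s
    · simp [h, ih]
    · simp [h, ih]

theorem pvSM_set (l : List Int) : ∀ (s : PySem.Set Int) (m : Int),
    (pvSM s m l).1 = PySem.Set.update s l := by
  induction l with
  | nil => intro s m; simp [pvSM, PySem.Set.update]
  | cons x xs ih =>
    intro s m
    simp only [pvSM, PySem.Set.update, List.foldl_cons]
    by_cases h : x ∈ s
    · simp only [h, if_true, ih, PySem.Set.contains_iff]
      simp [PySem.Set.update, PySem.Set.add_of_mem h]
    · simp only [h, if_false, ih, PySem.Set.contains_iff]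
      simp [PySem.Set.update]

theorem pvSM_min (l : List Int) : ∀ (s : PySem.Set Int) (m : Int), (∀ y ∈ s, m ≤ y) →
    (pvSM s m l).2 = l.foldl (fun acc d => min d acc) m := by
  induction l with
  | nil => intro s m _; simp [pvSM]
  | cons x xs ih =>
    intro s m hlb
    simp only [pvSM, List.foldl_cons]
    by_cases h : x ∈ s
    · simp only [PySem.Set.contains_iff, h, if_true]
      rw [ih s m hlb]
      have : min x m = m := by have := hlb x h; omega
      rw [this]
    · simp only [PySem.Set.contains_iff, h, if_false]
      rw [ih (PySem.Set.add s x) (min x m) ?_]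
      intro y hy
      rcases (PySem.Set.mem_add _ _ _).mp hy with h1 | h1
      · have := hlb y h1; omega
      · omega

theorem pvOfList_snoc (c : List Int) (x : Int) :
    PySem.Set.ofList (c ++ [x]) = PySem.Set.add (PySem.Set.ofList c) x := by
  simp [PySem.Set.ofList_eq_foldl]

-- the marker list equals a first-occurrence test over the enumerated input
theorem pvMk_eq (l : List Int) : ∀ (c : List Int),
    pvMk (PySem.Set.ofList c) l =
      (PySem.List.enumerate l (c.length : Int)).map
        (fun p => if PySem.List.index? (c ++ l) p.2 = some p.1.toNat then some p.2 else none) := by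
  induction l with
  | nil => intro c; simp [pvMk, PySem.List.enumerate_nil]
  | cons x xs ih =>
    intro c
    rw [PySem.List.enumerate_cons, List.map_cons]
    have hset : PySem.Set.add (PySem.Set.ofList c) x = PySem.Set.ofList (c ++ [x]) :=
      (pvOfList_snoc c x).symm
    have htail : pvMk (PySem.Set.add (PySem.Set.ofList c) x) xs =
        (PySem.List.enumerate xs ((c.length : Int) + 1)).map
          (fun p => if PySem.List.index? (c ++ x :: xs) p.2 = some p.1.toNat then some p.2 else none) := by
      rw [hset, ih (c ++ [x])]
      simp [List.append_assoc]
    by_cases h : x ∈ c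
    · have hhead : PySem.List.index? (c ++ x :: xs) x ≠ some ((c.length : Int)).toNat := by
        rw [PySem.List.index?_append_of_mem _ h]
        intro hk
        rcases (PySem.List.index?_eq_some_iff c x _).mp hk with ⟨pre, suf, hcs, hlen, _⟩
        have : pre.length < c.length := by
          rw [hcs]; simp
        omega
      rw [show pvMk (PySem.Set.ofList c) (x :: xs) = none :: pvMk (PySem.Set.ofList c) xs by
        simp [pvMk, h]]
      rw [show pvMk (PySem.Set.ofList c) xs = pvMk (PySem.Set.add (PySem.Set.ofList c) x) xs by
        rw [PySem.Set.add_of_mem ((PySem.Set.mem_ofList _ _).mpr h)]]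
      rw [htail, if_neg hhead]
    · have hhead : PySem.List.index? (c ++ x :: xs) x = some ((c.length : Int)).toNat := by
        rw [PySem.List.index?_eq_some_iff]
        exact ⟨c, xs, rfl, by simp, h⟩
      rw [show pvMk (PySem.Set.ofList c) (x :: xs) =
            some x :: pvMk (PySem.Set.add (PySem.Set.ofList c) x) xs by
        simp [pvMk, h]]
      rw [htail, if_pos hhead]

def pvF (vals : List Int) (p : Int × Int) : Option Int :=
  if PySem.List.index? vals p.2 = some p.1.toNat then some p.2 else none

theorem pvEnum_map {α β : Type} (g : α → β) (xs : List α) : ∀ (s : Int),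
    PySem.List.enumerate (xs.map g) s =
      (PySem.List.enumerate xs s).map (fun p => (p.1, g p.2)) := by
  induction xs with
  | nil => intro s; simp [PySem.List.enumerate_nil]
  | cons x t ih => intro s; simp [PySem.List.enumerate_cons, ih]

theorem pvEnum_enum {α : Type} (xs : List α) : ∀ (s : Int),
    PySem.List.enumerate (PySem.List.enumerate xs s) s =
      (PySem.List.enumerate xs s).map (fun p => (p.1, p)) := by
  induction xs with
  | nil => intro s; simp [PySem.List.enumerate_nil]
  | cons x t ih => intro s; simp [PySem.List.enumerate_cons, ih]

theorem pvMk0 (b0 : Int) (rest : List Int) :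
    some b0 :: pvMk (PySem.Set.ofList [b0]) rest =
      (PySem.List.enumerate (b0 :: rest) 0).map (pvF (b0 :: rest)) := by
  rw [pvMk_eq rest [b0], PySem.List.enumerate_cons, List.map_cons]
  have h0 : pvF (b0 :: rest) (0, b0) = some b0 := by
    simp only [pvF, PySem.List.index?_cons_self]
    norm_num
  rw [h0]
  norm_num
  intro a b _
  simp [pvF, PySem.List.index?_eq_idxOf?]

-- ---------- the canonical fill (shared reference shape for both fill loops) ----------
-- keeps an entry iff it is the first occurrence of its value and the value is ≤ e;
-- otherwise consumes the head of the substitution list m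
def pvCan (vals : List Int) (e : Int) : List (Int × Int) → List Int → List Int × List Int
  | [], _ => ([], [])
  | p :: t, m =>
    if PySem.List.index? vals p.2 = some p.1.toNat ∧ p.2 ≤ e then
      (p.2 :: (pvCan vals e t m).1, (pvCan vals e t m).2)
    else
      (m.headD 0 :: (pvCan vals e t m.tail).1, p.1 :: (pvCan vals e t m.tail).2)

def pvRep (vals : List Int) (e : Int) (E : List (Int × Int)) : Nat :=
  E.countP (fun p => !(decide (PySem.List.index? vals p.2 = some p.1.toNat ∧ p.2 ≤ e)))

-- the canonical backward step (B's fill step with the condition in first-occurrence form)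
def pvStepB (vals : List Int) (e : Int) (acc : List Int × List Int × List Int)
    (q : Int × Int) : List Int × List Int × List Int :=
  if PySem.List.index? vals q.2 = some q.1.toNat ∧ q.2 ≤ e then
    (acc.1 ++ [q.2], acc.2)
  else (acc.1 ++ [acc.2.2.getLastD 0], acc.2.1 ++ [q.1], acc.2.2.dropLast)

theorem pvCan_pos (vals : List Int) (e : Int) (q : Int × Int) (t : List (Int × Int))
    (m : List Int) (h : PySem.List.index? vals q.2 = some q.1.toNat ∧ q.2 ≤ e) :
    pvCan vals e (q :: t) m = (q.2 :: (pvCan vals e t m).1, (pvCan vals e t m).2) := by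
  rw [pvCan, if_pos h]

theorem pvCan_neg (vals : List Int) (e : Int) (q : Int × Int) (t : List (Int × Int))
    (m : List Int) (h : ¬ (PySem.List.index? vals q.2 = some q.1.toNat ∧ q.2 ≤ e)) :
    pvCan vals e (q :: t) m
      = (m.headD 0 :: (pvCan vals e t m.tail).1, q.1 :: (pvCan vals e t m.tail).2) := by
  rw [pvCan, if_neg h]

theorem pvRep_cons_pos (vals : List Int) (e : Int) (q : Int × Int) (t : List (Int × Int))
    (h : PySem.List.index? vals q.2 = some q.1.toNat ∧ q.2 ≤ e) :
    pvRep vals e (q :: t) = pvRep vals e t := by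
  unfold pvRep
  rw [List.countP_cons]
  rw [decide_eq_true h]
  simp

theorem pvRep_cons_neg (vals : List Int) (e : Int) (q : Int × Int) (t : List (Int × Int))
    (h : ¬ (PySem.List.index? vals q.2 = some q.1.toNat ∧ q.2 ≤ e)) :
    pvRep vals e (q :: t) = pvRep vals e t + 1 := by
  unfold pvRep
  rw [List.countP_cons]
  rw [decide_eq_false h]
  simp

theorem pvStepB_pos (vals : List Int) (e : Int) (acc : List Int × List Int × List Int)
    (q : Int × Int) (h : PySem.List.index? vals q.2 = some q.1.toNat ∧ q.2 ≤ e) :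
    pvStepB vals e acc q = (acc.1 ++ [q.2], acc.2) := by
  rw [pvStepB, if_pos h]

theorem pvStepB_neg (vals : List Int) (e : Int) (acc : List Int × List Int × List Int)
    (q : Int × Int) (h : ¬ (PySem.List.index? vals q.2 = some q.1.toNat ∧ q.2 ≤ e)) :
    pvStepB vals e acc q
      = (acc.1 ++ [acc.2.2.getLastD 0], acc.2.1 ++ [q.1], acc.2.2.dropLast) := by
  rw [pvStepB, if_neg h]

theorem pvA_step_pos (vals : List Int) (e : Int) (q : Int × Int)
    (acc : List Int × List Int × List Int)
    (h : PySem.List.index? vals q.2 = some q.1.toNat ∧ q.2 ≤ e) :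
    pvA_fill e acc (q.1, pvF vals q) = (acc.1 ++ [q.2], acc.2) := by
  have h1' : List.idxOf? q.2 vals = some q.1.toNat := by simpa using h.1
  simp [pvA_fill, pvF, h1', show ¬ e < q.2 by omega]

theorem pvA_step_neg (vals : List Int) (e : Int) (q : Int × Int)
    (acc : List Int × List Int × List Int)
    (h : ¬ (PySem.List.index? vals q.2 = some q.1.toNat ∧ q.2 ≤ e)) :
    pvA_fill e acc (q.1, pvF vals q)
      = (acc.1 ++ [acc.2.2.headD 0], acc.2.1 ++ [q.1], acc.2.2.tail) := by
  by_cases h1 : PySem.List.index? vals q.2 = some q.1.toNat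
  · have h1' : List.idxOf? q.2 vals = some q.1.toNat := by simpa using h1
    have h2 : e < q.2 := by
      by_contra hc
      exact h ⟨h1, by omega⟩
    simp [pvA_fill, pvF, h1', h2]
  · have h1' : ¬ (List.idxOf? q.2 vals = some q.1.toNat) := by simpa using h1
    simp [pvA_fill, pvF, h1']

-- A's forward fill is the canonical fill (missing list consumed from the front)
theorem pvA_fill_can (vals : List Int) (e : Int) (E : List (Int × Int)) :
    ∀ (r p m : List Int),
    E.foldl (fun acc q => pvA_fill e acc (q.1, pvF vals q)) (r, p, m) =
      (r ++ (pvCan vals e E m).1, p ++ (pvCan vals e E m).2, m.drop (pvRep vals e E)) := by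
  induction E with
  | nil => intro r p m; simp [pvCan, pvRep]
  | cons q t ih =>
    intro r p m
    rw [List.foldl_cons]
    by_cases h : PySem.List.index? vals q.2 = some q.1.toNat ∧ q.2 ≤ e
    · rw [pvA_step_pos vals e q (r, p, m) h, ih, pvCan_pos vals e q t m h,
        pvRep_cons_pos vals e q t h]
      simp
    · rw [pvA_step_neg vals e q (r, p, m) h, ih, pvCan_neg vals e q t m h,
        pvRep_cons_neg vals e q t h]
      have hdrop : m.tail.drop (pvRep vals e t) = m.drop (pvRep vals e t + 1) := by
        rw [← List.drop_one, List.drop_drop, Nat.add_comm]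
      rw [hdrop]
      simp

-- B's backward fill is the canonical fill run on the tail end of the gap list
theorem pvB_fill_can (vals : List Int) (e : Int) (E : List (Int × Int)) :
    ∀ (g r p : List Int), pvRep vals e E ≤ g.length →
    E.foldr (fun q acc => pvStepB vals e acc q) (r, p, g) =
      (r ++ (pvCan vals e E (g.drop (g.length - pvRep vals e E))).1.reverse,
       p ++ (pvCan vals e E (g.drop (g.length - pvRep vals e E))).2.reverse,
       g.take (g.length - pvRep vals e E)) := by
  induction E with
  | nil => intro g r p h; simp [pvCan, pvRep]
  | cons q t ih =>
    intro g r p h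
    rw [List.foldr_cons]
    by_cases hq : PySem.List.index? vals q.2 = some q.1.toNat ∧ q.2 ≤ e
    · have hrep := pvRep_cons_pos vals e q t hq
      rw [ih g r p (by rw [hrep] at h; exact h)]
      rw [pvStepB_pos vals e _ q hq, hrep, pvCan_pos vals e q t _ hq]
      simp
    · have hrep := pvRep_cons_neg vals e q t hq
      have hle : pvRep vals e t ≤ g.length := by omega
      rw [ih g r p hle]
      rw [pvStepB_neg vals e _ q hq, hrep]
      have hlen1 : pvRep vals e t + 1 ≤ g.length := by omega
      have hdlt : g.length - (pvRep vals e t + 1) < g.length := by omega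
      have hd1 : g.length - pvRep vals e t = (g.length - (pvRep vals e t + 1)) + 1 := by omega
      have htake : (g.take (g.length - pvRep vals e t)).getLastD 0
          = g[g.length - (pvRep vals e t + 1)] := by
        rw [hd1, List.getLastD_eq_getLast?, List.getLast?_eq_getElem?]
        have hlt : (g.take (g.length - (pvRep vals e t + 1) + 1)).length
            = g.length - (pvRep vals e t + 1) + 1 := by
          rw [List.length_take]
          omega
        rw [hlt, Nat.add_sub_cancel, List.getElem?_take_of_lt (by omega),
          List.getElem?_eq_getElem hdlt]
        rfl
      have hdropLast : (g.take (g.length - pvRep vals e t)).dropLast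
          = g.take (g.length - (pvRep vals e t + 1)) := by
        rw [hd1, List.dropLast_eq_take]
        have hlt : (g.take (g.length - (pvRep vals e t + 1) + 1)).length
            = g.length - (pvRep vals e t + 1) + 1 := by
          rw [List.length_take]
          omega
        rw [hlt, Nat.add_sub_cancel, List.take_take]
        congr 1
        omega
      have hcons : g.drop (g.length - (pvRep vals e t + 1))
          = g[g.length - (pvRep vals e t + 1)] :: g.drop (g.length - (pvRep vals e t + 1) + 1) :=
        List.drop_eq_getElem_cons hdlt
      rw [htake, hdropLast, pvCan_neg vals e q t _ hq, hcons]
      rw [← hd1]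
      simp

-- ---------- characterisation of B's first-occurrence array ----------
def pvFSf (bg : Int) (u : List Int) (j : Nat) : Int :=
  match PySem.List.index? u (bg + (j : Int)) with
  | some k => (k : Int)
  | none => -1

def pvFS (bg : Int) (n : Nat) (u : List Int) : List Int :=
  (List.range n).map (pvFSf bg u)

theorem pvFS_length (bg : Int) (n : Nat) (u : List Int) : (pvFS bg n u).length = n := by
  simp [pvFS]

theorem pvFS_getElem (bg : Int) (n : Nat) (u : List Int) (j : Nat)
    (hj : j < (pvFS bg n u).length) : (pvFS bg n u)[j] = pvFSf bg u j := by
  simp [pvFS, List.getElem_map, List.getElem_range]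

theorem pvFS_getD (bg : Int) (n : Nat) (u : List Int) (j : Nat) (hj : j < n) :
    (pvFS bg n u).getD j 0 = pvFSf bg u j := by
  rw [List.getD_eq_getElem?_getD,
    List.getElem?_eq_getElem (by rw [pvFS_length]; exact hj)]
  rw [pvFS_getElem]
  rfl

theorem pvIdxNone (xs : List Int) (v : Int) (h : v ∉ xs) : PySem.List.index? xs v = none := by
  rcases hidx : PySem.List.index? xs v with _ | k
  · rfl
  · exact absurd ((PySem.List.index?_isSome_iff xs v).mp (by rw [hidx]; rfl)) h

theorem pvIdx_snoc_ne (pre : List Int) (x v : Int) (hne : v ≠ x) :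
    PySem.List.index? (pre ++ [x]) v = PySem.List.index? pre v := by
  by_cases hv : v ∈ pre
  · exact PySem.List.index?_append_of_mem _ hv
  · rw [pvIdxNone (pre ++ [x]) v (by simp [hv, hne]), pvIdxNone pre v hv]

theorem pvFSf_snoc_ne (bg : Int) (pre : List Int) (x : Int) (j : Nat)
    (hne : bg + (j : Int) ≠ x) : pvFSf bg (pre ++ [x]) j = pvFSf bg pre j := by
  unfold pvFSf
  rw [pvIdx_snoc_ne pre x _ hne]

theorem pvFSf_of_idx (bg : Int) (u : List Int) (j : Nat) (k : Nat)
    (h : PySem.List.index? u (bg + (j : Int)) = some k) : pvFSf bg u j = (k : Int) := by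
  unfold pvFSf
  rw [h]

theorem pvFSf_of_none (bg : Int) (u : List Int) (j : Nat)
    (h : PySem.List.index? u (bg + (j : Int)) = none) : pvFSf bg u j = -1 := by
  unfold pvFSf
  rw [h]

theorem pvFS_snoc (bg : Int) (n : Nat) (pre : List Int) (x : Int) :
    pvFS bg n (pre ++ [x]) =
      (if 0 ≤ x - bg ∧ x - bg < (n : Int) ∧ (pvFS bg n pre).getD (x - bg).toNat 0 = -1
       then (pvFS bg n pre).set (x - bg).toNat (pre.length : Int)
       else pvFS bg n pre) := by
  split_ifs with hC
  · obtain ⟨h0, hlt, hm1⟩ := hC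
    have hjx : (x - bg).toNat < n := by omega
    have hbgx : bg + (((x - bg).toNat : Nat) : Int) = x := by omega
    have hxpre : x ∉ pre := by
      intro hmem
      obtain ⟨k0, hk0⟩ := Option.isSome_iff_exists.mp
        ((PySem.List.index?_isSome_iff pre x).mpr hmem)
      have hfs := pvFSf_of_idx bg pre (x - bg).toNat k0 (by rw [hbgx]; exact hk0)
      rw [pvFS_getD bg n pre _ hjx, hfs] at hm1
      omega
    apply List.ext_getElem
    · simp [pvFS_length]
    · intro j hj hj'
      have hjn : j < n := by
        have := hj
        rw [pvFS_length] at this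
        exact this
      rw [pvFS_getElem]
      by_cases hjeq : j = (x - bg).toNat
      · subst hjeq
        have : pvFSf bg (pre ++ [x]) (x - bg).toNat = (pre.length : Int) :=
          pvFSf_of_idx bg (pre ++ [x]) (x - bg).toNat pre.length
            (by rw [hbgx]; exact PySem.List.index?_append_singleton_self _ _ hxpre)
        rw [this, List.getElem_set_self]
      · have hne : bg + (j : Int) ≠ x := by omega
        rw [pvFSf_snoc_ne bg pre x j hne, List.getElem_set_ne (by omega)]
        rw [pvFS_getElem]
  · apply List.ext_getElem
    · simp [pvFS_length]
    · intro j hj hj'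
      have hjn : j < n := by
        have := hj
        rw [pvFS_length] at this
        exact this
      rw [pvFS_getElem, pvFS_getElem]
      by_cases hne : bg + (j : Int) = x
      · -- the condition failed although x lands in a valid slot: x must already be in pre
        have h0 : 0 ≤ x - bg := by omega
        have hlt : x - bg < (n : Int) := by omega
        have hjx : (x - bg).toNat < n := by omega
        have hbgx : bg + (((x - bg).toNat : Nat) : Int) = x := by omega
        have hm1 : ¬ (pvFS bg n pre).getD (x - bg).toNat 0 = -1 := by
          intro hh
          exact hC ⟨h0, hlt, hh⟩
        rw [pvFS_getD bg n pre _ hjx] at hm1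
        have hxpre : x ∈ pre := by
          rcases hidx : PySem.List.index? pre x with _ | k0
          · exact absurd (pvFSf_of_none bg pre (x - bg).toNat (by rw [hbgx]; exact hidx)) hm1
          · exact (PySem.List.index?_isSome_iff pre x).mp (by rw [hidx]; rfl)
        unfold pvFSf
        rw [hne, PySem.List.index?_append_of_mem _ hxpre]
      · rw [pvFSf_snoc_ne bg pre x j hne]

theorem pvMark_go (vals : List Int) (bg : Int) :
    ∀ (t pre : List Int), pre ++ t = vals →
    (PySem.List.enumerate t (pre.length : Int)).foldl
      (fun f q => pvB_mark vals vals.length bg f q.1) (pvFS bg vals.length pre)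
    = pvFS bg vals.length vals := by
  intro t
  induction t with
  | nil =>
    intro pre h
    rw [PySem.List.enumerate_nil, List.foldl_nil]
    rw [show pre = vals by simpa using h]
  | cons x t' ih =>
    intro pre h
    rw [PySem.List.enumerate_cons, List.foldl_cons]
    dsimp only
    have hvx : vals.getD ((pre.length : Int)).toNat 0 = x := by
      rw [← h, List.getD_eq_getElem?_getD, Int.toNat_natCast,
        List.getElem?_append_right (le_refl _)]
      simp
    have hstep : pvB_mark vals vals.length bg (pvFS bg vals.length pre) ((pre.length : Int))
        = pvFS bg vals.length (pre ++ [x]) := by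
      rw [pvB_mark]
      simp only [hvx]
      exact (pvFS_snoc bg vals.length pre x).symm
    rw [hstep]
    have hcast : (pre.length : Int) + 1 = (((pre ++ [x]).length : Nat) : Int) := by
      simp
    rw [hcast]
    exact ih (pre ++ [x]) (by simpa using h)

theorem pvMark_spec (vals : List Int) (bg : Int) :
    (PySem.List.pyRange 0 (vals.length : Int) 1).foldl (pvB_mark vals vals.length bg)
      (List.replicate vals.length (-1 : Int)) = pvFS bg vals.length vals := by
  have hrange : PySem.List.pyRange 0 (vals.length : Int) 1
      = (PySem.List.enumerate vals 0).map (fun p => p.1) := by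
    rw [PySem.List.map_fst_enumerate]
    norm_num
  rw [hrange, List.foldl_map]
  have hinit : List.replicate vals.length (-1 : Int) = pvFS bg vals.length ([] : List Int) := by
    apply List.ext_getElem
    · simp [pvFS_length]
    · intro j hj hj'
      rw [pvFS_getElem]
      unfold pvFSf
      rw [pvIdxNone [] _ (by simp)]
      simp
  rw [hinit]
  exact pvMark_go vals bg vals [] rfl

-- B's actual fill step agrees with the canonical backward step on the enumerated input
theorem pvCond (vals : List Int) (bg e : Int) (hmin : ∀ y ∈ vals, bg ≤ y)
    (he : e = (vals.length : Int) + bg - 1)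
    (q : Int × Int) (hq : q ∈ PySem.List.enumerate vals 0)
    (acc : List Int × List Int × List Int) :
    pvB_fill vals vals.length bg (pvFS bg vals.length vals) acc q.1
      = pvStepB vals e acc q := by
  rcases (PySem.List.mem_enumerate_iff _ _ _).mp hq with ⟨k, hk, hpq⟩
  have hq1 : q.1 = (k : Int) := by rw [hpq]; simp
  have hq2 : q.2 = vals[k] := by rw [hpq]
  have hvm : q.2 ∈ vals := by rw [hq2]; exact List.getElem_mem hk
  have hv : vals.getD (q.1.toNat) 0 = q.2 := by
    rw [hq1, Int.toNat_natCast, List.getD_eq_getElem?_getD, List.getElem?_eq_getElem hk, hq2]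
    rfl
  have h0 : 0 ≤ q.2 - bg := by
    have := hmin q.2 hvm
    omega
  rw [pvB_fill, pvStepB]
  simp only [hv]
  by_cases hlt : q.2 - bg < (vals.length : Int)
  · have hjn : (q.2 - bg).toNat < vals.length := by omega
    have hbgj : bg + (((q.2 - bg).toNat : Nat) : Int) = q.2 := by omega
    obtain ⟨k0, hk0⟩ := Option.isSome_iff_exists.mp
      ((PySem.List.index?_isSome_iff vals q.2).mpr hvm)
    have hfs : (pvFS bg vals.length vals).getD (q.2 - bg).toNat 0 = (k0 : Int) := by
      rw [pvFS_getD bg vals.length vals _ hjn]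
      unfold pvFSf
      rw [hbgj, hk0]
    by_cases hc : k0 = k
    · rw [if_pos ⟨h0, hlt, by rw [hfs, hq1, hc]⟩,
        if_pos ⟨by rw [hk0, hq1, Int.toNat_natCast, hc], by omega⟩]
    · rw [if_neg ?_, if_neg ?_]
      · rintro ⟨hidx, -⟩
        rw [hk0, hq1, Int.toNat_natCast] at hidx
        exact hc (by simpa using hidx)
      · rintro ⟨-, -, hfe⟩
        rw [hfs, hq1] at hfe
        exact hc (by exact_mod_cast hfe)
  · rw [if_neg (by rintro ⟨-, h2, -⟩; omega), if_neg (by rintro ⟨-, h2⟩; omega)]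

-- ---------- the two missing/gap lists coincide ----------
theorem pvFilterMapIf {A B : Type} (l : List A) (p : A → Prop) [DecidablePred p] (g : A → B) :
    l.filterMap (fun j => if p j then some (g j) else none)
      = (l.filter (fun j => decide (p j))).map g := by
  induction l with
  | nil => rfl
  | cons x t ih =>
    by_cases h : p x
    · simp [List.filterMap_cons, List.filter_cons, h, ih]
    · simp [List.filterMap_cons, List.filter_cons, h, ih]

theorem pvGapsB (vals : List Int) (bg : Int) :
    (PySem.List.pyRange 0 (vals.length : Int) 1).filterMap
      (fun j => if (pvFS bg vals.length vals).getD j.toNat 0 = -1 then some (bg + j) else none)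
    = ((PySem.List.pyRange 0 (vals.length : Int) 1).filter
        (fun j => !(decide ((bg + j) ∈ vals)))).map (fun j => bg + j) := by
  rw [pvFilterMapIf]
  congr 1
  apply List.filter_congr
  intro j hj
  have hj' := (PySem.List.mem_pyRange_one).mp hj
  have hjn : j.toNat < vals.length := by omega
  have hbgj : bg + ((j.toNat : Nat) : Int) = bg + j := by omega
  rw [pvFS_getD bg vals.length vals _ hjn]
  unfold pvFSf
  rw [hbgj]
  rcases hidx : PySem.List.index? vals (bg + j) with _ | k0
  · have hmem : (bg + j) ∉ vals := by
      intro hm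
      have := (PySem.List.index?_isSome_iff vals (bg + j)).mpr hm
      rw [hidx] at this
      exact absurd this (by simp)
    simp [hmem]
  · have hmem : (bg + j) ∈ vals := (PySem.List.index?_isSome_iff vals _).mp (by rw [hidx]; rfl)
    have : ¬ ((k0 : Int) = -1) := by omega
    simp [hmem, this]

theorem pvMissA (vals : List Int) (bg : Int) :
    (PySem.List.pyRange bg ((vals.length : Int) + bg - 1 + 1) 1).filter
      (fun x => !(PySem.Set.contains (PySem.Set.ofList vals) x))
    = ((PySem.List.pyRange 0 (vals.length : Int) 1).filter
        (fun j => !(decide ((bg + j) ∈ vals)))).map (fun j => bg + j) := by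
  have hshift : PySem.List.pyRange bg ((vals.length : Int) + bg - 1 + 1) 1
      = (PySem.List.pyRange 0 (vals.length : Int) 1).map (fun j => bg + j) := by
    rw [PySem.List.pyRange_one, PySem.List.pyRange_one, List.map_map]
    rw [show ((vals.length : Int) + bg - 1 + 1 - bg).toNat = ((vals.length : Int) - 0).toNat by
      omega]
    apply List.map_congr_left
    intro k hk
    simp
  rw [hshift, List.filter_map]
  congr 1
  apply List.filter_congr
  intro j hj
  simp only [Function.comp]
  by_cases h : (bg + j) ∈ vals
  · have h2 : (bg + j) ∈ PySem.Set.ofList vals := (PySem.Set.mem_ofList vals (bg + j)).mpr h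
    simp [h, h2, PySem.Set.contains_iff]
  · have h2 : (bg + j) ∉ PySem.Set.ofList vals := fun hc => h ((PySem.Set.mem_ofList vals _).mp hc)
    simp [h, h2, PySem.Set.contains_iff]

-- ---------- counting: replacements = gaps ----------
theorem pvCount (vals : List Int) (bg : Int) (hmin : ∀ y ∈ vals, bg ≤ y) :
    pvRep vals ((vals.length : Int) + bg - 1) (PySem.List.enumerate vals 0) =
      ((PySem.List.pyRange 0 (vals.length : Int) 1).filter
        (fun j => !(decide ((bg + j) ∈ vals)))).length := by
  set n := vals.length with hn
  set e : Int := (n : Int) + bg - 1 with he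
  set E := PySem.List.enumerate vals 0 with hE
  set cnd : Int × Int → Bool :=
    fun p => decide (PySem.List.index? vals p.2 = some p.1.toNat ∧ p.2 ≤ e) with hcnd
  have hElen : E.length = n := by rw [hE, PySem.List.length_enumerate]
  have hEnodup : E.Nodup := by
    have hp := PySem.List.pairwise_lt_enumerate vals (0 : Int)
    exact hp.imp (fun {a b} hlt => by
      intro heq
      rw [heq] at hlt
      exact lt_irrefl _ hlt)
  have hfstnn : ∀ q ∈ E, 0 ≤ q.1 := by
    intro q hq
    rcases (PySem.List.mem_enumerate_iff _ _ _).mp hq with ⟨k, hk, hpq⟩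
    rw [hpq]
    simp
  have hL2nodup : ((E.filter cnd).map (fun q => q.2)).Nodup := by
    refine List.Nodup.map_on ?_ (hEnodup.filter cnd)
    intro a ha b hb hab
    have ha' := List.mem_filter.mp ha
    have hb' := List.mem_filter.mp hb
    have hca := of_decide_eq_true ha'.2
    have hcb := of_decide_eq_true hb'.2
    have h1 : a.1.toNat = b.1.toNat := by
      have hx := hca.1
      rw [hab, hcb.1] at hx
      exact (Option.some_inj.mp hx).symm
    have hann := hfstnn a ha'.1
    have hbnn := hfstnn b hb'.1
    have h2 : a.1 = b.1 := by omega
    exact Prod.ext h2 hab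
  have hL1nodup : (((PySem.List.pyRange 0 (n : Int) 1).filter
      (fun j => decide ((bg + j) ∈ vals))).map (fun j => bg + j)).Nodup := by
    refine List.Nodup.map_on ?_ ((PySem.List.nodup_pyRange_one _ _).filter _)
    intro a _ b _ hab
    omega
  have hmem : ∀ v, v ∈ (E.filter cnd).map (fun q => q.2) ↔
      v ∈ ((PySem.List.pyRange 0 (n : Int) 1).filter
        (fun j => decide ((bg + j) ∈ vals))).map (fun j => bg + j) := by
    intro v
    constructor
    · intro hv
      rcases List.mem_map.mp hv with ⟨q, hqf, hqv⟩
      have hq' := List.mem_filter.mp hqf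
      have hc := of_decide_eq_true hq'.2
      have hvvals : v ∈ vals := by
        rw [← hqv]
        exact (PySem.List.index?_isSome_iff vals q.2).mp (by rw [hc.1]; rfl)
      have hble : bg ≤ v := hmin v hvvals
      have hvle : v ≤ e := by rw [← hqv]; exact hc.2
      refine List.mem_map.mpr ⟨v - bg, List.mem_filter.mpr ⟨?_, ?_⟩, by omega⟩
      · rw [PySem.List.mem_pyRange_one]
        omega
      · simp only [show bg + (v - bg) = v by omega]
        exact decide_eq_true hvvals
    · intro hv
      rcases List.mem_map.mp hv with ⟨j, hjf, hjv⟩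
      have hj' := List.mem_filter.mp hjf
      have hjr := (PySem.List.mem_pyRange_one).mp hj'.1
      have hvvals : v ∈ vals := by
        rw [← hjv]
        exact of_decide_eq_true hj'.2
      obtain ⟨k0, hk0⟩ := Option.isSome_iff_exists.mp
        ((PySem.List.index?_isSome_iff vals v).mpr hvvals)
      obtain ⟨hk0lt, hk0v, -⟩ := PySem.List.getElem_of_index?_eq_some hk0
      refine List.mem_map.mpr ⟨((k0 : Int), v), List.mem_filter.mpr ⟨?_, ?_⟩, rfl⟩
      · refine (PySem.List.mem_enumerate_iff _ _ _).mpr ⟨k0, hk0lt, ?_⟩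
        rw [hk0v]
        simp
      · exact decide_eq_true ⟨by rw [Int.toNat_natCast]; exact hk0, by omega⟩
  have hperm := (List.perm_ext_iff_of_nodup hL2nodup hL1nodup).mpr hmem
  have hlen12 := hperm.length_eq
  rw [List.length_map, ← List.countP_eq_length_filter] at hlen12
  have hsplit := List.length_eq_length_filter_add
    (l := PySem.List.pyRange 0 (n : Int) 1) (fun j => decide ((bg + j) ∈ vals))
  have hrlen : (PySem.List.pyRange 0 (n : Int) 1).length = n := by
    rw [PySem.List.length_pyRange_one]
    omega
  have hcsplit := List.length_eq_countP_add_countP (l := E) (p := cnd)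
  have hnot : E.countP (fun a => !(cnd a)) = E.countP (fun a => decide ¬(cnd a = true)) := by
    apply List.countP_congr
    intro a _
    by_cases hca : cnd a <;> simp [hca]
  have hrepdef : pvRep vals e E = E.countP (fun a => !(cnd a)) := by
    rw [pvRep, hcnd]
  rw [hrepdef]
  rw [List.length_map] at hlen12
  omega

-- ---------- proof-side abbreviations for the common canonical result ----------
-- (defined just below; pvGapsB2 restates pvGapsB with the result folded into pvM)
def pvBG (vals : List Int) : Int := (PySem.List.min? vals (fun x => x)).getD 0
def pvEnd (vals : List Int) : Int := (vals.length : Int) + pvBG vals - 1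
def pvM (vals : List Int) : List Int :=
  ((PySem.List.pyRange 0 (vals.length : Int) 1).filter
    (fun j => !(decide ((pvBG vals + j) ∈ vals)))).map (fun j => pvBG vals + j)
def pvC (vals : List Int) : List Int × List Int :=
  pvCan vals (pvEnd vals) (PySem.List.enumerate vals 0) (pvM vals)

theorem pvGapsB2 (b0 : Int) (rest : List Int) :
    (PySem.List.pyRange 0 (((b0 :: rest).length : Int)) 1).filterMap
      (fun j => if (pvFS ((PySem.List.min? (b0 :: rest) (fun x => x)).getD 0)
          (b0 :: rest).length (b0 :: rest)).getD j.toNat 0 = -1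
        then some ((PySem.List.min? (b0 :: rest) (fun x => x)).getD 0 + j) else none)
    = pvM (b0 :: rest) :=
  pvGapsB (b0 :: rest) ((PySem.List.min? (b0 :: rest) (fun x => x)).getD 0)

-- ---------- main equivalence ----------
theorem pvMinLB (b0 : Int) (rest : List Int) :
    ∀ y ∈ (b0 :: rest), (PySem.List.min? (b0 :: rest) (fun x => x)).getD 0 ≤ y := by
  intro y hy
  have h := PySem.List.min?_id_cons (x := b0) (t := rest)
  have := PySem.List.min?_isMin h y hy
  rw [h]
  exact this

theorem pvMainA (b0 : Int) (rest : List Int) :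
    get_incremental_list (b0 :: rest)
      = (((pvC (b0 :: rest)).2.length : Int), (pvC (b0 :: rest)).2, (pvC (b0 :: rest)).1) := by
  simp only [get_incremental_list, pvA_loop]
  simp only [List.singleton_append]
  rw [pvMk0 b0 rest]
  rw [pvSM_set, pvSM_min rest _ _ (by
    intro y hy
    have hmem : y ∈ ([b0] : List Int) := hy
    simp at hmem
    omega)]
  have hused : PySem.Set.update (PySem.Set.ofList [b0]) rest = PySem.Set.ofList (b0 :: rest) := by
    simp [PySem.Set.update, PySem.Set.ofList_eq_foldl, PySem.Set.add]
  have hminf : rest.foldl (fun acc d => min d acc) b0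
      = (PySem.List.min? (b0 :: rest) (fun x => x)).getD 0 := by
    rw [PySem.List.min?_id_cons]
    simp only [Option.getD_some]
    exact PySem.List.foldl_congr_mem rest _ _ b0 (fun acc x hx => min_comm x acc)
  have hlen : (List.map (pvF (b0 :: rest)) (PySem.List.enumerate (b0 :: rest) 0)).length
      = (b0 :: rest).length := by
    simp [PySem.List.length_enumerate]
  rw [hused, hminf]
  simp only [hlen]
  rw [pvEnum_map, pvEnum_enum, List.map_map, List.foldl_map]
  dsimp only [Function.comp]
  rw [pvMissA (b0 :: rest) ((PySem.List.min? (b0 :: rest) (fun x => x)).getD 0)]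
  rw [pvA_fill_can]
  simp only [List.nil_append]
  rfl

theorem pvMainB (b0 : Int) (rest : List Int) :
    get_incremental_list_alt (b0 :: rest)
      = (((pvC (b0 :: rest)).2.length : Int), (pvC (b0 :: rest)).2, (pvC (b0 :: rest)).1) := by
  simp only [get_incremental_list_alt]
  rw [if_neg (by simp)]
  rw [pvMark_spec (b0 :: rest) ((PySem.List.min? (b0 :: rest) (fun x => x)).getD 0)]
  rw [pvGapsB2 b0 rest]
  have hrange : PySem.List.pyRange (((b0 :: rest).length : Int) - 1) (-1) (-1)
      = ((PySem.List.enumerate (b0 :: rest) 0).map (fun p => p.1)).reverse := by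
    rw [PySem.List.pyRange_neg_one_eq_reverse, PySem.List.map_fst_enumerate]
    norm_num
  rw [hrange, ← List.map_reverse, List.foldl_map]
  have hcong : (PySem.List.enumerate (b0 :: rest) 0).reverse.foldl
        (fun acc q => pvB_fill (b0 :: rest) (b0 :: rest).length
          ((PySem.List.min? (b0 :: rest) (fun x => x)).getD 0)
          (pvFS ((PySem.List.min? (b0 :: rest) (fun x => x)).getD 0)
            (b0 :: rest).length (b0 :: rest)) acc q.1) ([], [], pvM (b0 :: rest))
      = (PySem.List.enumerate (b0 :: rest) 0).reverse.foldl
        (fun acc q => pvStepB (b0 :: rest) (pvEnd (b0 :: rest)) acc q)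
        ([], [], pvM (b0 :: rest)) := by
    apply PySem.List.foldl_congr_mem
    intro acc q hq
    exact pvCond (b0 :: rest) _ _ (pvMinLB b0 rest) rfl q (List.mem_reverse.mp hq) acc
  rw [hcong, List.foldl_reverse]
  have hrep : pvRep (b0 :: rest) (pvEnd (b0 :: rest)) (PySem.List.enumerate (b0 :: rest) 0)
      = (pvM (b0 :: rest)).length := by
    rw [pvM, List.length_map]
    exact pvCount (b0 :: rest) _ (pvMinLB b0 rest)
  rw [pvB_fill_can (b0 :: rest) (pvEnd (b0 :: rest)) (PySem.List.enumerate (b0 :: rest) 0)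
    (pvM (b0 :: rest)) [] [] (le_of_eq hrep)]
  rw [hrep, Nat.sub_self, List.drop_zero, List.take_zero]
  simp only [List.nil_append, List.reverse_reverse, List.length_reverse]
  rfl

theorem pvMain (digits : List Int) :
    get_incremental_list digits = get_incremental_list_alt digits := by
  cases digits with
  | nil => rfl
  | cons b0 rest => rw [pvMainA, pvMainB]

-- ===== VERDICT (by name: the statement is the Claim_ definition above) =====
theorem get_incremental_list_spec : Claim_equal_get_incremental_list := by
  intro digits _
  unfold Spec_get_incremental_list
  exact pvMain digits
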